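-- pv_equiv track=rewrite | github.com/jonstaryuk/advent-of-code | 2017/day01.py | solve
-- ===== SOURCE A (Python) =====
-- def solve(s):
--     total = 0
--
--     for i in range(len(s) - 1):
--         if s[i] == s[i + 1]:
--             total += int(s[i])
--     if s[0] == s[-1]:
--         total += int(s[0])
--
--     return total
-- ===== SOURCE B (Python) =====
-- def solve(s):
--     runs = []
--     for c in s:
--         if runs and runs[-1][0] == c:
--             runs[-1][1] += 1
--         else:
--             runs.append([c, 1])
--     total = sum((k - 1) * int(c) for c, k in runs if k > 1)
--     if s[0] == s[-1]:
--         total += int(s[0])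
--     return total
-- ===== Notes on version B (the rewrite author's own statement) =====
-- stated objective: alternative
-- what changed: Run-length encodes the string into maximal runs and sums (length-1)*digit per run arithmetically, replacing A's per-index adjacent-pair comparison loop; only the circular first/last check remains positional.
import Mathlib
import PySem

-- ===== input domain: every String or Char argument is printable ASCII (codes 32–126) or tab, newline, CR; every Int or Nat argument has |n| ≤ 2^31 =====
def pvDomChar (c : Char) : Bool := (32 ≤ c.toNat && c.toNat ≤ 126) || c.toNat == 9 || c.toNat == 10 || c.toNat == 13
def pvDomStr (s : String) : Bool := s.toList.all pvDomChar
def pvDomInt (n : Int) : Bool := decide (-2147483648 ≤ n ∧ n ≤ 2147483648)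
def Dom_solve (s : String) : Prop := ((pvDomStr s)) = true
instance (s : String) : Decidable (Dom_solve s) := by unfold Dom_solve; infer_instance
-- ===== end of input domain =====

-- B run-length encodes the string and sums (length-1)*digit per maximal run instead of
-- comparing each indexed character with its successor (objective: alternative).

-- int(<one-character string>) as both Pythons apply it (only reached on digit chars under Pre_)
def pyIntChar (c : Char) : Int := (PySem.Int.ofChars? [c]).getD 0

-- ===== PORT A =====
def solve (s : String) : Int :=
  let l := s.toList
  let total :=
    (PySem.List.pyRange 0 ((l.length : Int) - 1) 1).foldl
      (fun total i =>
        if PySem.List.pyGetD l i ' ' = PySem.List.pyGetD l (i + 1) ' ' then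
          total + pyIntChar (PySem.List.pyGetD l i ' ')
        else total) 0
  if PySem.List.pyGetD l 0 ' ' = PySem.List.pyGetD l (-1) ' ' then
    total + pyIntChar (PySem.List.pyGetD l 0 ' ')
  else total

-- ===== PORT B =====
-- B's run-building step (reversed accumulator; head = Python's runs[-1])
def stepB (rs : List (Char × Int)) (c : Char) : List (Char × Int) :=
  match rs with
  | (d, k) :: rest => if d = c then (d, k + 1) :: rest else (c, (1 : Int)) :: (d, k) :: rest
  | [] => [(c, (1 : Int))]

-- Python mutates/extends `runs` at its end; the port keeps the accumulator reversed
-- (head = runs[-1]) and reverses at the end, which is the same construction.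
def solve_alt (s : String) : Int :=
  let l := s.toList
  let runs := (l.foldl stepB []).reverse
  let total :=
    ((runs.filter (fun p => decide (1 < p.2))).map (fun p => (p.2 - 1) * pyIntChar p.1)).sum
  if PySem.List.pyGetD l 0 ' ' = PySem.List.pyGetD l (-1) ' ' then
    total + pyIntChar (PySem.List.pyGetD l 0 ' ')
  else total

-- ===== PRECONDITION & SPEC =====
-- Pre_ excludes exactly the inputs where A (and B) raise: the empty string (IndexError on s[0])
-- and strings where a matched pair (adjacent, or first/last) is a non-digit char (ValueError in int()).
def Pre_solve (s : String) : Prop :=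
  s.toList ≠ [] ∧
  ((s.toList.zip s.toList.tail).all
     (fun p => !(p.1 == p.2) || PySem.Chars.isdigit p.1)) = true ∧
  (s.toList[0]? = s.toList.getLast? → PySem.Chars.isdigit (s.toList.headD ' ') = true)
instance (s : String) : Decidable (Pre_solve s) := by unfold Pre_solve; infer_instance

def pvWitness_solve : String := "91212129"

def Spec_solve (s : String) (out : Int) : Prop := out = solve_alt s
instance (s : String) (out : Int) : Decidable (Spec_solve s out) := by unfold Spec_solve; infer_instance

-- ===== CLAIM (what is proved, stated in full; the proofs are below) =====
def Claim_equal_solve : Prop := ∀ (s : String), Dom_solve s → Pre_solve s → Spec_solve s (solve s)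

-- ===== LEMMAS AND PROOFS =====

-- the circular-free sum of matching adjacent-pair digits, as a structural recursion
def gAdj (d : Char) : List Char → Int
  | [] => 0
  | c :: t => (if d = c then pyIntChar d else 0) + gAdj c t

-- A's loop step on an adjacent pair
def stepA (t : Int) (p : Char × Char) : Int :=
  if p.1 = p.2 then t + pyIntChar p.1 else t

-- B's per-run contribution sum
def hFilt (rs : List (Char × Int)) : Int :=
  ((rs.filter (fun p => decide (1 < p.2))).map (fun p => (p.2 - 1) * pyIntChar p.1)).sum

lemma hFilt_cons (d : Char) (k : Int) (rest : List (Char × Int)) :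
    hFilt ((d, k) :: rest) = (if 1 < k then (k - 1) * pyIntChar d else 0) + hFilt rest := by
  by_cases h : 1 < k <;> simp [hFilt, List.filter, h]

-- A's fold over the adjacent pairs equals gAdj
lemma foldA_eq_gAdj (xs : List Char) (x : Char) (a : Int) :
    ((x :: xs).zip xs).foldl stepA a = a + gAdj x xs := by
  induction xs generalizing x a with
  | nil => simp [gAdj]
  | cons y t ih =>
    simp only [List.zip_cons_cons, List.foldl_cons, ih, gAdj, stepA]
    split_ifs <;> ring

-- B's run sum over the built runs equals gAdj (accumulator-generalized invariant)
lemma foldB_eq_gAdj (l : List Char) (d : Char) (k : Int) (rest : List (Char × Int))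
    (hk : 1 ≤ k) :
    hFilt (l.foldl stepB ((d, k) :: rest)) = hFilt ((d, k) :: rest) + gAdj d l := by
  induction l generalizing d k rest with
  | nil => simp [gAdj]
  | cons c t ih =>
    by_cases h : d = c
    · simp only [List.foldl_cons, stepB, if_pos h]
      rw [ih d (k + 1) rest (by omega)]
      rw [hFilt_cons, hFilt_cons, gAdj, if_pos h]
      subst h
      have h1 : (1 : Int) < k + 1 := by omega
      rw [if_pos h1]
      by_cases h2 : 1 < k
      · rw [if_pos h2]; ring
      · have hk1 : k = 1 := by omega
        rw [if_neg h2, hk1]; ring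
    · simp only [List.foldl_cons, stepB, if_neg h]
      rw [ih c 1 ((d, k) :: rest) (by omega)]
      rw [hFilt_cons c 1 ((d, k) :: rest), gAdj, if_neg h]
      norm_num

-- the indexed adjacent pairs are exactly zip l l.tail
lemma range_pairs_eq_zip_tail (l : List Char) :
    (List.range (l.length - 1)).map
        (fun i => (l.getD i ' ', l.getD (i + 1) ' ')) = l.zip l.tail := by
  apply List.ext_getElem
  · simp [List.length_zip, List.length_tail]
  · intro i h1 h2
    simp only [List.length_map, List.length_range] at h1
    have hi1 : i < l.length := by omega
    have hi2 : i + 1 < l.length := by omega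
    simp [List.getElem_zip, List.getD_eq_getElem?_getD, List.getElem?_eq_getElem hi1,
      List.getElem?_eq_getElem hi2, List.getElem_tail]

theorem solve_spec : Claim_equal_solve := by
  intro s _hdom hpre
  unfold Spec_solve solve solve_alt
  obtain ⟨hne, -, -⟩ := hpre
  obtain ⟨x, xs, hl⟩ := List.exists_cons_of_ne_nil hne
  simp only [hl]
  -- reduce A's pyRange fold to the fold over zip (x::xs) xs
  have hrange : PySem.List.pyRange 0 (((x :: xs).length : Int) - 1) 1
      = (List.range ((x :: xs).length - 1)).map (Nat.cast) := by
    have : (((x :: xs).length : Int) - 1) = (((x :: xs).length - 1 : Nat) : Int) := by simp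
    rw [this, PySem.List.pyRange_zero_natCast]
  rw [hrange, List.foldl_map]
  have hz := range_pairs_eq_zip_tail (x :: xs)
  simp only [List.tail_cons] at hz
  have hfoldA :
      (List.range ((x :: xs).length - 1)).foldl
        (fun total (i : Nat) =>
          if PySem.List.pyGetD (x :: xs) (i : Int) ' ' = PySem.List.pyGetD (x :: xs) ((i : Int) + 1) ' '
          then total + pyIntChar (PySem.List.pyGetD (x :: xs) (i : Int) ' ') else total) 0
      = ((x :: xs).zip xs).foldl stepA 0 := by
    rw [← hz, List.foldl_map]
    apply PySem.List.foldl_congr_mem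
    intro t i hi
    simp only [List.mem_range] at hi
    have h1 : ((i : Int) + 1) = ((i + 1 : Nat) : Int) := by push_cast; ring
    rw [h1]
    simp only [PySem.List.pyGetD_natCast, stepA]
  rw [hfoldA, foldA_eq_gAdj]
  -- reduce B's run sum to gAdj
  have hB : ((((List.foldl stepB [] (x :: xs)).reverse).filter
        (fun p => decide (1 < p.2))).map (fun p => (p.2 - 1) * pyIntChar p.1)).sum
      = gAdj x xs := by
    have hrev : ∀ rs : List (Char × Int),
        (((rs.reverse).filter (fun p => decide (1 < p.2))).map
          (fun p => (p.2 - 1) * pyIntChar p.1)).sum = hFilt rs := by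
      intro rs
      simp [hFilt, List.filter_reverse, List.map_reverse, List.sum_reverse]
    rw [hrev]
    have h0 : List.foldl stepB [] (x :: xs) = List.foldl stepB [(x, 1)] xs := by
      simp [stepB]
    rw [h0, foldB_eq_gAdj xs x 1 [] (by omega)]
    simp [hFilt]
  rw [hB]
  simp
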